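-- pv_equiv track=rewrite | github.com/tr1ten/DNA | task.py | solve
-- ===== SOURCE A (Python) =====
-- def solve(A,k):
--     def ok(x):
--         tk = 1
--         mx = 0
--         i = 0
--         for j in range(len(A)):
--             if max(mx,A[j])*(j-i+1) > x:
--                 mx = 0
--                 tk +=1
--                 i = j
--             mx = max(mx,A[j])
--         return tk<=k
--
--     lo,hi = 0,10**10
--     ans = 0
--     while lo <= hi:
--         mid = (lo+hi)//2
--         if ok(mid):
--             hi = mid-1
--             ans = mid
--         else:
--             lo = mid+1
--     return ans
-- ===== SOURCE B (Python) =====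
-- def _segments(A, x):
--     # number of segments the greedy cut produces with threshold x
--     # (same counting rule as the feasibility test: a new segment opens
--     # whenever extending the current one would push max(0,seg)*len above x)
--     tk = 1
--     mx = 0
--     i = 0
--     for j in range(len(A)):
--         if max(mx, A[j]) * (j - i + 1) > x:
--             mx = 0
--             tk += 1
--             i = j
--         mx = max(mx, A[j])
--     return tk
--
-- def solve(A, k):
--     CAP = 10 ** 10
--     n = len(A)
--     # the optimum is 0 or the cost of some contiguous segment: enumerate them
--     cands = {0}
--     for i in range(n):
--         m = 0
--         for j in range(i, n):
--             if A[j] > m: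
--                 m = A[j]
--             c = m * (j - i + 1)
--             if c > CAP:
--                 break  # cost only grows with j
--             cands.add(c)
--     for c in sorted(cands):
--         if _segments(A, c) <= k:
--             return c
--     return 0
-- ===== Notes on version B (the rewrite author's own statement) =====
-- stated objective: alternative
-- what changed: Replaces binary search over the fixed numeric range [0,10^10] with enumeration of the candidate segment costs (running-max per start index, breaking once a cost passes the cap) and a scan of the sorted candidate set for the first value the greedy cut accepts.
import Mathlib
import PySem

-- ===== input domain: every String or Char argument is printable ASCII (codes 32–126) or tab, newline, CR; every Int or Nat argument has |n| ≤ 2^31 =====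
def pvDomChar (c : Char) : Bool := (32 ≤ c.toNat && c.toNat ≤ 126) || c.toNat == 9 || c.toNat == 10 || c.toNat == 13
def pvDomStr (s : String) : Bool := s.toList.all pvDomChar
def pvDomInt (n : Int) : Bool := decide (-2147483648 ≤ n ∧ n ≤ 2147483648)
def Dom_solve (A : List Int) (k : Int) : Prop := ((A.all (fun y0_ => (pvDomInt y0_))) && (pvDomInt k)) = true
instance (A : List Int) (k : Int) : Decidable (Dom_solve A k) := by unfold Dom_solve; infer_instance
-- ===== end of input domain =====

-- B enumerates the candidate segment costs and scans them in sorted order instead of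
-- binary-searching the fixed range [0,10^10]; same return value everywhere (objective: alternative).

-- ===== PORT A =====
-- state (tk, mx, i): one step of the greedy feasibility loop 'for j in range(len(A))'
def okStep (A : List Int) (x : Int) (s : Int × Int × Nat) (j : Nat) : Int × Int × Nat :=
  let a := A.getD j 0
  if max s.2.1 a * ((j : Int) - (s.2.2 : Int) + 1) > x then
    (s.1 + 1, max 0 a, j)            -- mx = 0; tk += 1; i = j; then mx = max(mx, A[j])
  else
    (s.1, max s.2.1 a, s.2.2)        -- mx = max(mx, A[j])

def okRun (A : List Int) (x : Int) (n : Nat) : Int × Int × Nat :=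
  (List.range n).foldl (okStep A x) (1, 0, 0)

-- def ok(x): … return tk <= k
def solveOk (A : List Int) (k : Int) (x : Int) : Bool :=
  decide ((okRun A x A.length).1 ≤ k)

-- while lo <= hi: mid = (lo+hi)//2; …
def solveLoop (A : List Int) (k lo hi ans : Int) : Int :=
  if h : lo ≤ hi then
    let mid := PySem.Int.floordiv (lo + hi) 2
    if solveOk A k mid then solveLoop A k lo (mid - 1) mid
    else solveLoop A k (mid + 1) hi ans
  else ans
termination_by (hi + 1 - lo).toNat
decreasing_by
  · have hb := PySem.Int.floordiv_two_mid_bounds h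
    omega
  · have hb := PySem.Int.floordiv_two_mid_bounds h
    omega

def solve (A : List Int) (k : Int) : Int :=
  solveLoop A k 0 (10 ^ 10) 0

-- ===== PORT B =====
-- B's _segments: the same greedy cut counter, one step per j
def altStep (A : List Int) (x : Int) (s : Int × Int × Nat) (j : Nat) : Int × Int × Nat :=
  let a := A.getD j 0
  if max s.2.1 a * ((j : Int) - (s.2.2 : Int) + 1) > x then
    (s.1 + 1, max 0 a, j)
  else
    (s.1, max s.2.1 a, s.2.2)

def altCount (A : List Int) (x : Int) : Int :=
  ((List.range A.length).foldl (altStep A x) (1, 0, 0)).1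

-- inner candidate loop 'for j in range(i, n)' with the break once c > CAP
def altInner (A : List Int) (i j : Nat) (m : Int) (cands : PySem.Set Int) : PySem.Set Int :=
  if _h : j < A.length then
    let a := A.getD j 0
    let m' := if a > m then a else m
    let c := m' * ((j : Int) - (i : Int) + 1)
    if c > 10 ^ 10 then cands
    else altInner A i (j + 1) m' (PySem.Set.add cands c)
  else cands
termination_by A.length - j

def altCands (A : List Int) : PySem.Set Int :=
  (List.range A.length).foldl (fun cands i => altInner A i i 0 cands) (PySem.Set.ofList [0])

-- 'for c in sorted(cands): if _segments(A, c) <= k: return c' / 'return 0'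
def altScan (A : List Int) (k : Int) : List Int → Int
  | [] => 0
  | c :: rest => if altCount A c ≤ k then c else altScan A k rest

def solve_alt (A : List Int) (k : Int) : Int :=
  altScan A k (PySem.List.sorted (altCands A) (fun c => c) false)

-- ===== PRECONDITION & SPEC =====
def Spec_solve (A : List Int) (k : Int) (out : Int) : Prop := out = solve_alt A k
instance (A : List Int) (k : Int) (out : Int) : Decidable (Spec_solve A k out) := by unfold Spec_solve; infer_instance

-- ===== CLAIM (what is proved, stated in full; the proofs are below) =====
def Claim_equal_solve : Prop := ∀ (A : List Int) (k : Int), Dom_solve A k → Spec_solve A k (solve A k)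

-- ===== LEMMAS AND PROOFS =====

-- max(0, A[i..j-1]): the running segment maximum the greedy maintains
def segMax (A : List Int) (i : Nat) : Nat → Int
  | 0 => 0
  | j + 1 => if j < i then 0 else max (segMax A i j) (A.getD j 0)

-- cost of segment [i..j]
def segCost (A : List Int) (i j : Nat) : Int :=
  segMax A i (j + 1) * ((j : Int) - (i : Int) + 1)

theorem segMax_nonneg (A : List Int) (i j : Nat) : 0 ≤ segMax A i j := by
  induction j with
  | zero => simp [segMax]
  | succ j ih =>
    simp only [segMax]
    split
    · exact le_refl 0
    · exact le_trans ih (le_max_left _ _)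

theorem segMax_self (A : List Int) (i : Nat) : segMax A i i = 0 := by
  cases i with
  | zero => simp [segMax]
  | succ t => simp [segMax]

theorem segMax_succ_of_le (A : List Int) {i j : Nat} (h : i ≤ j) :
    segMax A i (j + 1) = max (segMax A i j) (A.getD j 0) := by
  simp [segMax, Nat.not_lt.mpr h]

theorem segMax_mono_j (A : List Int) (i : Nat) {j j' : Nat} (h : j ≤ j') :
    segMax A i j ≤ segMax A i j' := by
  induction j' with
  | zero => simp_all
  | succ j' ih =>
    rcases Nat.lt_or_ge j (j' + 1) with hlt | hge
    · have hj : j ≤ j' := Nat.lt_succ_iff.mp hlt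
      refine le_trans (ih hj) ?_
      simp only [segMax]
      split
      · have := segMax_nonneg A i j'
        have h0 : segMax A i j' = 0 := by
          cases j' with
          | zero => simp [segMax]
          | succ t => simp [segMax]; omega
        omega
      · exact le_max_left _ _
    · have : j = j' + 1 := le_antisymm h hge
      subst this; exact le_refl _

theorem segMax_anti_i (A : List Int) {i i' : Nat} (j : Nat) (h : i ≤ i') :
    segMax A i' j ≤ segMax A i j := by
  induction j with
  | zero => simp [segMax]
  | succ j ih =>
    simp only [segMax]
    split
    · split
      · exact le_refl 0
      · exact le_trans (segMax_nonneg A i j) (le_max_left _ _)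
    · have hij : ¬ j < i := by omega
      simp only [hij, if_false]
      exact max_le_max_right _ ih

theorem segCost_nonneg (A : List Int) {i j : Nat} (h : i ≤ j) : 0 ≤ segCost A i j := by
  unfold segCost
  have h1 := segMax_nonneg A i (j + 1)
  have h2 : (0 : Int) ≤ (j : Int) - (i : Int) + 1 := by
    have : (i : Int) ≤ (j : Int) := by exact_mod_cast h
    omega
  exact mul_nonneg h1 h2

theorem segCost_anti_i (A : List Int) {i i' j : Nat} (h1 : i ≤ i') (h2 : i' ≤ j) :
    segCost A i' j ≤ segCost A i j := by
  unfold segCost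
  have hm := segMax_anti_i A (j + 1) h1
  have hm' := segMax_nonneg A i' (j + 1)
  have hl : ((j : Int) - (i' : Int) + 1) ≤ ((j : Int) - (i : Int) + 1) := by
    have : (i : Int) ≤ (i' : Int) := by exact_mod_cast h1
    omega
  have hl' : (0 : Int) ≤ (j : Int) - (i' : Int) + 1 := by
    have : (i' : Int) ≤ (j : Int) := by exact_mod_cast h2
    omega
  exact mul_le_mul hm hl hl' (segMax_nonneg A i (j + 1))

theorem segCost_mono_j (A : List Int) {i j j' : Nat} (h1 : i ≤ j) (h2 : j ≤ j') :
    segCost A i j ≤ segCost A i j' := by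
  unfold segCost
  have hm := segMax_mono_j A i (Nat.succ_le_succ h2)
  have hm0 := segMax_nonneg A i (j + 1)
  have hl : ((j : Int) - (i : Int) + 1) ≤ ((j' : Int) - (i : Int) + 1) := by
    have : (j : Int) ≤ (j' : Int) := by exact_mod_cast h2
    omega
  have hl' : (0 : Int) ≤ (j : Int) - (i : Int) + 1 := by
    have : (i : Int) ≤ (j : Int) := by exact_mod_cast h1
    omega
  exact mul_le_mul hm hl hl' (le_trans hm0 hm)

theorem okRun_succ (A : List Int) (x : Int) (n : Nat) :
    okRun A x (n + 1) = okStep A x (okRun A x n) n := by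
  simp [okRun, List.range_succ]

theorem okRun_char (A : List Int) (x : Int) (n : Nat) :
    (okRun A x n).2.1 = segMax A (okRun A x n).2.2 n ∧ (okRun A x n).2.2 ≤ n ∧
      (0 < n → (okRun A x n).2.2 < n) := by
  induction n with
  | zero => simp [okRun, segMax]
  | succ n ih =>
    rw [okRun_succ]
    obtain ⟨hmx, hile, _⟩ := ih
    simp only [okStep]
    split
    · refine ⟨?_, show n ≤ n + 1 by omega, fun _ => show n < n + 1 by omega⟩
      show max 0 (A.getD n 0) = segMax A n (n + 1)
      rw [segMax_succ_of_le A (le_refl n), segMax_self]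
    · refine ⟨?_, show (okRun A x n).2.2 ≤ n + 1 by omega,
        fun _ => show (okRun A x n).2.2 < n + 1 by omega⟩
      show max (okRun A x n).2.1 (A.getD n 0) = segMax A (okRun A x n).2.2 (n + 1)
      rw [segMax_succ_of_le A hile, hmx]

theorem okRun_mono (A : List Int) {x y : Int} (hxy : x ≤ y) (n : Nat) :
    (okRun A y n).1 ≤ (okRun A x n).1 ∧
      ((okRun A y n).2.2 < (okRun A x n).2.2 → (okRun A y n).1 < (okRun A x n).1) := by
  induction n with
  | zero => simp [okRun]
  | succ n ih =>
    obtain ⟨hmx, hix, _⟩ := okRun_char A x n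
    obtain ⟨hmy, hiy, _⟩ := okRun_char A y n
    obtain ⟨ih1, ih2⟩ := ih
    rw [okRun_succ, okRun_succ]
    simp only [okStep]
    have hex : max (okRun A x n).2.1 (A.getD n 0) * ((n : Int) - ((okRun A x n).2.2 : Int) + 1)
        = segCost A (okRun A x n).2.2 n := by
      rw [hmx, segCost, segMax_succ_of_le A hix]
    have hey : max (okRun A y n).2.1 (A.getD n 0) * ((n : Int) - ((okRun A y n).2.2 : Int) + 1)
        = segCost A (okRun A y n).2.2 n := by
      rw [hmy, segCost, segMax_succ_of_le A hiy]
    rw [hex, hey]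
    by_cases hcx : segCost A (okRun A x n).2.2 n > x <;>
      by_cases hcy : segCost A (okRun A y n).2.2 n > y
    · -- both break
      simp only [if_pos hcx, if_pos hcy]
      exact ⟨by omega, fun h => by omega⟩
    · -- x breaks, y does not
      simp only [if_pos hcx, if_neg hcy]
      exact ⟨by omega, fun _ => by omega⟩
    · -- y breaks, x does not
      simp only [if_neg hcx, if_pos hcy]
      have hiylt : (okRun A y n).2.2 < (okRun A x n).2.2 := by
        by_contra hge
        push Not at hge
        have := segCost_anti_i A (i := (okRun A x n).2.2) (i' := (okRun A y n).2.2) hge hiy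
        omega
      have := ih2 hiylt
      exact ⟨by omega, fun h => by omega⟩
    · -- neither breaks
      simp only [if_neg hcx, if_neg hcy]
      exact ⟨ih1, ih2⟩

theorem okRun_stable (A : List Int) {x y : Int} (hxy : x ≤ y)
    (hgap : ∀ i j : Nat, i ≤ j → j < A.length → ¬(x < segCost A i j ∧ segCost A i j ≤ y)) :
    ∀ n, n ≤ A.length → okRun A x n = okRun A y n := by
  intro n
  induction n with
  | zero => intro _; rfl
  | succ n ih =>
    intro hn
    have heq := ih (by omega)
    obtain ⟨hmy, hiy, _⟩ := okRun_char A y n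
    rw [okRun_succ, okRun_succ, heq]
    simp only [okStep]
    have hey : max (okRun A y n).2.1 (A.getD n 0) * ((n : Int) - ((okRun A y n).2.2 : Int) + 1)
        = segCost A (okRun A y n).2.2 n := by
      rw [hmy, segCost, segMax_succ_of_le A hiy]
    rw [hey]
    have hiff : segCost A (okRun A y n).2.2 n > x ↔ segCost A (okRun A y n).2.2 n > y := by
      constructor
      · intro hgx
        by_contra hgy
        exact hgap _ n hiy (by omega) ⟨hgx, by omega⟩
      · intro hgy; omega
    by_cases hc : segCost A (okRun A y n).2.2 n > y
    · rw [if_pos (hiff.mpr hc), if_pos hc]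
    · rw [if_neg (fun h => hc (hiff.mp h)), if_neg hc]

-- the feasibility predicate both programs test
def Feas (A : List Int) (k x : Int) : Prop := (okRun A x A.length).1 ≤ k

theorem altCount_eq (A : List Int) (x : Int) : altCount A x = (okRun A x A.length).1 := rfl

theorem feas_mono (A : List Int) {k x y : Int} (hxy : x ≤ y) (h : Feas A k x) : Feas A k y := by
  have := (okRun_mono A hxy A.length).1
  unfold Feas at *; omega

theorem solveLoop_spec (A : List Int) (k : Int) :
    ∀ (N : Nat) (lo hi ans : Int), (hi + 1 - lo).toNat ≤ N →
      ((∀ x, lo ≤ x → x ≤ hi → ¬ Feas A k x) → solveLoop A k lo hi ans = ans) ∧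
      (∀ m, lo ≤ m → m ≤ hi → Feas A k m → (∀ z, lo ≤ z → z < m → ¬ Feas A k z) →
        solveLoop A k lo hi ans = m) := by
  intro N
  induction N with
  | zero =>
    intro lo hi ans hN
    have hnl : ¬ lo ≤ hi := by omega
    constructor
    · intro _; rw [solveLoop]; simp [hnl]
    · intro m hm1 hm2 _ _; omega
  | succ N ihN =>
    intro lo hi ans hN
    by_cases hle : lo ≤ hi
    · have hb := PySem.Int.floordiv_two_mid_bounds hle
      have hunf : solveLoop A k lo hi ans =
          if solveOk A k (PySem.Int.floordiv (lo + hi) 2) then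
            solveLoop A k lo (PySem.Int.floordiv (lo + hi) 2 - 1) (PySem.Int.floordiv (lo + hi) 2)
          else solveLoop A k (PySem.Int.floordiv (lo + hi) 2 + 1) hi ans := by
        rw [solveLoop]; simp [hle]
      set mid := PySem.Int.floordiv (lo + hi) 2 with hmid
      constructor
      · intro hall
        have hnf : ¬ Feas A k mid := hall mid hb.1 hb.2
        have hok : solveOk A k mid = false := by
          simp only [solveOk, decide_eq_false_iff_not]; exact hnf
        rw [hunf, hok, if_neg (by simp)]
        exact (ihN (mid + 1) hi ans (by omega)).1 (fun z hz1 hz2 => hall z (by omega) hz2)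
      · intro m hm1 hm2 hfm hmin
        by_cases hok : Feas A k mid
        · have hmmid : m ≤ mid := by
            by_contra h
            exact hmin mid hb.1 (by omega) hok
          have hoke : solveOk A k mid = true := by
            simp only [solveOk, decide_eq_true_eq]; exact hok
          rw [hunf, hoke, if_pos rfl]
          rcases eq_or_lt_of_le hmmid with heq | hlt
          · rw [heq]
            exact (ihN lo (mid - 1) mid (by omega)).1
              (fun z hz1 hz2 => hmin z hz1 (by omega))
          · exact (ihN lo (mid - 1) mid (by omega)).2 m hm1 (by omega) hfm hmin
        · have hmid2 : mid < m := by
            by_contra h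
            exact hok (feas_mono A (by omega) hfm)
          have hoke : solveOk A k mid = false := by
            simp only [solveOk, decide_eq_false_iff_not]; exact hok
          rw [hunf, hoke, if_neg (by simp)]
          exact (ihN (mid + 1) hi ans (by omega)).2 m (by omega) hm2 hfm
            (fun z hz1 hz2 => hmin z (by omega) hz2)
    · constructor
      · intro _; rw [solveLoop]; simp [hle]
      · intro m hm1 hm2 _ _; omega

theorem mem_altInner (A : List Int) (i : Nat) (y : Int) :
    ∀ (j : Nat) (m : Int) (cands : PySem.Set Int), i ≤ j → m = segMax A i j →
      (y ∈ altInner A i j m cands ↔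
        y ∈ cands ∨ ∃ j', j ≤ j' ∧ j' < A.length ∧ segCost A i j' = y ∧ y ≤ 10 ^ 10) := by
  have main : ∀ (d j : Nat) (m : Int) (cands : PySem.Set Int), A.length - j ≤ d → i ≤ j →
      m = segMax A i j →
      (y ∈ altInner A i j m cands ↔
        y ∈ cands ∨ ∃ j', j ≤ j' ∧ j' < A.length ∧ segCost A i j' = y ∧ y ≤ 10 ^ 10) := by
    intro d
    induction d with
    | zero =>
      intro j m cands hd hij _
      rw [altInner]
      rw [dif_neg (by omega)]
      constructor
      · exact Or.inl
      · rintro (h | ⟨j', h1, h2, _⟩)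
        · exact h
        · omega
    | succ d ihd =>
      intro j m cands hd hij hm
      rw [altInner]
      by_cases hj : j < A.length
      · rw [dif_pos hj]
        have hmax : (if A.getD j 0 > m then A.getD j 0 else m) = max m (A.getD j 0) := by
          rcases max_cases m (A.getD j 0) with ⟨h1, h2⟩ | ⟨h1, h2⟩ <;> split <;> omega
        have hm' : (if A.getD j 0 > m then A.getD j 0 else m) = segMax A i (j + 1) := by
          rw [hmax, hm, segMax_succ_of_le A hij]
        have hc : (if A.getD j 0 > m then A.getD j 0 else m) * ((j : Int) - (i : Int) + 1)
            = segCost A i j := by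
          rw [hm', segCost]
        simp only [hc]
        by_cases hcap : segCost A i j > 10 ^ 10
        · rw [if_pos hcap]
          constructor
          · exact Or.inl
          · rintro (h | ⟨j', h1, h2, h3, h4⟩)
            · exact h
            · have := segCost_mono_j A hij h1
              omega
        · rw [if_neg hcap]
          rw [ihd (j + 1) _ _ (by omega) (by omega) hm']
          rw [PySem.Set.mem_add]
          constructor
          · rintro ((h | h) | ⟨j', h1, h2, h3, h4⟩)
            · exact Or.inl h
            · exact Or.inr ⟨j, le_refl j, hj, h.symm, by omega⟩
            · exact Or.inr ⟨j', by omega, h2, h3, h4⟩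
          · rintro (h | ⟨j', h1, h2, h3, h4⟩)
            · exact Or.inl (Or.inl h)
            · rcases Nat.eq_or_lt_of_le h1 with heq | hlt
              · exact Or.inl (Or.inr (by rw [← heq] at h3; omega))
              · exact Or.inr ⟨j', by omega, h2, h3, h4⟩
      · rw [dif_neg hj]
        constructor
        · exact Or.inl
        · rintro (h | ⟨j', h1, h2, _⟩)
          · exact h
          · omega
  exact fun j m cands => main (A.length - j) j m cands (le_refl _)

theorem mem_altCands (A : List Int) (y : Int) :
    y ∈ altCands A ↔
      y = 0 ∨ ∃ i j : Nat, i ≤ j ∧ j < A.length ∧ segCost A i j = y ∧ y ≤ 10 ^ 10 := by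
  have main : ∀ n : Nat,
      y ∈ (List.range n).foldl (fun cands i => altInner A i i 0 cands) (PySem.Set.ofList [0]) ↔
        y = 0 ∨ ∃ i j : Nat, i < n ∧ i ≤ j ∧ j < A.length ∧ segCost A i j = y ∧ y ≤ 10 ^ 10 := by
    intro n
    induction n with
    | zero =>
      simp [PySem.Set.mem_ofList]
    | succ n ih =>
      rw [List.range_succ, List.foldl_append]
      simp only [List.foldl_cons, List.foldl_nil]
      rw [mem_altInner A n y n 0 _ (le_refl n) (segMax_self A n).symm, ih]
      constructor
      · rintro ((h | ⟨i, j, h1, h2, h3, h4, h5⟩) | ⟨j', h1, h2, h3, h4⟩)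
        · exact Or.inl h
        · exact Or.inr ⟨i, j, by omega, h2, h3, h4, h5⟩
        · exact Or.inr ⟨n, j', by omega, h1, h2, h3, h4⟩
      · rintro (h | ⟨i, j, h1, h2, h3, h4, h5⟩)
        · exact Or.inl (Or.inl h)
        · rcases Nat.lt_succ_iff_lt_or_eq.mp h1 with hlt | heq
          · exact Or.inl (Or.inr ⟨i, j, hlt, h2, h3, h4, h5⟩)
          · subst heq
            exact Or.inr ⟨j, h2, h3, h4, h5⟩
  rw [altCands, main A.length]
  constructor
  · rintro (h | ⟨i, j, _, h2, h3, h4, h5⟩)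
    · exact Or.inl h
    · exact Or.inr ⟨i, j, h2, h3, h4, h5⟩
  · rintro (h | ⟨i, j, h2, h3, h4, h5⟩)
    · exact Or.inl h
    · exact Or.inr ⟨i, j, by omega, h2, h3, h4, h5⟩

theorem nodup_altInner (A : List Int) (i : Nat) :
    ∀ (j : Nat) (m : Int) (cands : PySem.Set Int), cands.Nodup →
      (altInner A i j m cands).Nodup := by
  have main : ∀ (d j : Nat) (m : Int) (cands : PySem.Set Int), A.length - j ≤ d →
      cands.Nodup → (altInner A i j m cands).Nodup := by
    intro d
    induction d with
    | zero =>
      intro j m cands hd h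
      rw [altInner, dif_neg (by omega)]
      exact h
    | succ d ihd =>
      intro j m cands hd h
      rw [altInner]
      by_cases hj : j < A.length
      · rw [dif_pos hj]
        dsimp only
        split <;> split
        · exact h
        · exact ihd (j + 1) _ _ (by omega) (PySem.Set.nodup_add _ _ h)
        · exact h
        · exact ihd (j + 1) _ _ (by omega) (PySem.Set.nodup_add _ _ h)
      · rw [dif_neg hj]; exact h
  exact fun j m cands => main (A.length - j) j m cands (le_refl _)

theorem nodup_altCands (A : List Int) : (altCands A).Nodup := by
  have main : ∀ (l : List Nat) (init : PySem.Set Int), init.Nodup →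
      (l.foldl (fun cands i => altInner A i i 0 cands) init).Nodup := by
    intro l
    induction l with
    | nil => exact fun init h => h
    | cons i l ih => exact fun init h => ih _ (nodup_altInner A i i 0 init h)
  rw [altCands]
  exact main _ _ (PySem.Set.nodup_ofList _)

theorem altScan_zero (A : List Int) (k : Int) (cs : List Int)
    (h : ∀ c ∈ cs, ¬ Feas A k c) : altScan A k cs = 0 := by
  induction cs with
  | nil => rfl
  | cons c rest ih =>
    rw [altScan, if_neg (show ¬ altCount A c ≤ k by
      rw [altCount_eq]; exact h c (by simp))]
    exact ih (fun c' hc' => h c' (by simp [hc']))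

theorem altScan_first (A : List Int) (k m : Int) (cs : List Int)
    (hs : cs.Pairwise (· < ·)) (hm : m ∈ cs) (hf : Feas A k m)
    (hmin : ∀ c ∈ cs, c < m → ¬ Feas A k c) : altScan A k cs = m := by
  induction cs with
  | nil => simp at hm
  | cons c rest ih =>
    by_cases hfc : Feas A k c
    · rw [altScan, if_pos (show altCount A c ≤ k by rw [altCount_eq]; exact hfc)]
      rcases List.mem_cons.mp hm with heq | hmem
      · omega
      · have hcm : c < m := (List.pairwise_cons.mp hs).1 m hmem
        exact absurd hfc (hmin c (by simp) hcm)
    · rw [altScan, if_neg (show ¬ altCount A c ≤ k by rw [altCount_eq]; exact hfc)]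
      have hmc : m ≠ c := fun h => hfc (h ▸ hf)
      exact ih (List.pairwise_cons.mp hs).2 ((List.mem_cons.mp hm).resolve_left (by omega))
        (fun c' hc' => hmin c' (by simp [hc']))

-- ===== VERDICT (by name: the statement is the Claim_ definition above) =====
theorem sorted_cands_facts (A : List Int) :
    (PySem.List.sorted (altCands A) (fun c => c) false).Pairwise (· < ·) ∧
      ∀ y, y ∈ PySem.List.sorted (altCands A) (fun c => c) false ↔ y ∈ altCands A := by
  constructor
  · have hle := PySem.List.sorted_pairwise (altCands A) (fun c : Int => c)
    have hnd : (PySem.List.sorted (altCands A) (fun c => c) false).Nodup :=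
      List.Perm.nodup (PySem.List.sorted_perm (altCands A) (fun c : Int => c) false).symm
        (nodup_altCands A)
    exact (hle.and hnd).imp (fun h => lt_of_le_of_ne h.1 h.2)
  · intro y
    exact PySem.List.mem_sorted _ _ _ y

theorem solve_spec : Claim_equal_solve := by
  intro A k _
  unfold Spec_solve solve solve_alt
  have hN : ((10 ^ 10 : Int) + 1 - 0).toNat ≤ ((10 ^ 10 : Int) + 1 - 0).toNat := le_refl _
  obtain ⟨hpair, hmemcs⟩ := sorted_cands_facts A
  by_cases hex : ∃ x : Int, (0 ≤ x ∧ x ≤ 10 ^ 10) ∧ Feas A k x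
  · -- a feasible threshold exists in the searched range: both sides return the least one
    have hdec : DecidablePred (fun x : Int => (0 ≤ x ∧ x ≤ 10 ^ 10) ∧ Feas A k x) := by
      intro x; unfold Feas; infer_instance
    obtain ⟨m, ⟨⟨hm0, hmC⟩, hmf⟩, hleast⟩ :=
      Int.exists_least_of_bdd (P := fun x : Int => (0 ≤ x ∧ x ≤ 10 ^ 10) ∧ Feas A k x)
        ⟨0, fun z hz => hz.1.1⟩ hex
    have hmin0 : ∀ z : Int, 0 ≤ z → z < m → ¬ Feas A k z := by
      intro z hz1 hz2 hf
      have := hleast z ⟨⟨hz1, by omega⟩, hf⟩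
      omega
    have hA : solveLoop A k 0 (10 ^ 10) 0 = m :=
      (solveLoop_spec A k _ 0 (10 ^ 10) 0 hN).2 m hm0 hmC hmf hmin0
    -- the least feasible threshold is one of B's candidates
    set costsLe : List Int :=
      ((List.range A.length).flatMap
        (fun j => (List.range (j + 1)).map (fun i => segCost A i j))).filter
        (fun c => decide (c ≤ m)) with hcostsLe
    set ρ : Int := costsLe.foldl max 0 with hρdef
    have hmemCosts : ∀ i j : Nat, i ≤ j → j < A.length → segCost A i j ≤ m →
        segCost A i j ∈ costsLe := by
      intro i j h1 h2 h3
      rw [hcostsLe, List.mem_filter]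
      refine ⟨List.mem_flatMap.mpr ⟨j, List.mem_range.mpr h2,
        List.mem_map.mpr ⟨i, List.mem_range.mpr (by omega), rfl⟩⟩, by simpa using h3⟩
    have hρub : ∀ i j : Nat, i ≤ j → j < A.length → segCost A i j ≤ m →
        segCost A i j ≤ ρ := by
      intro i j h1 h2 h3
      exact (PySem.List.le_foldl_max costsLe 0).2 _ (hmemCosts i j h1 h2 h3)
    have hρm : ρ ≤ m := by
      rcases PySem.List.foldl_max_mem costsLe 0 with h0 | hmem'
      · omega
      · have := (List.mem_filter.mp (hρdef ▸ hmem')).2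
        simpa using this
    have hρ0 : (0 : Int) ≤ ρ := (PySem.List.le_foldl_max costsLe 0).1
    have hstab := okRun_stable A hρm
      (fun i j h1 h2 h => absurd (hρub i j h1 h2 h.2) (by omega)) A.length (le_refl _)
    have hfρ : Feas A k ρ := by
      unfold Feas
      rw [hstab]
      exact hmf
    have hρeq : ρ = m := le_antisymm hρm (hleast ρ ⟨⟨hρ0, by omega⟩, hfρ⟩)
    have hmem : m ∈ altCands A := by
      rw [mem_altCands]
      rcases PySem.List.foldl_max_mem costsLe 0 with h0 | hmem'
      · left; omega
      · right
        obtain ⟨j, hj, hmap⟩ := List.mem_flatMap.mp (List.mem_filter.mp (hρdef ▸ hmem')).1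
        obtain ⟨i, hi, hcost⟩ := List.mem_map.mp hmap
        exact ⟨i, j, Nat.lt_succ_iff.mp (List.mem_range.mp hi),
          List.mem_range.mp hj, by omega, by omega⟩
    have hmincs : ∀ c ∈ PySem.List.sorted (altCands A) (fun c => c) false, c < m →
        ¬ Feas A k c := by
      intro c hc hlt hf
      have hc' := (hmemcs c).mp hc
      rw [mem_altCands] at hc'
      have h0c : (0 : Int) ≤ c := by
        rcases hc' with rfl | ⟨i, j, h1, _, hceq, _⟩
        · exact le_refl 0
        · exact hceq ▸ segCost_nonneg A h1
      exact absurd (hleast c ⟨⟨h0c, by omega⟩, hf⟩) (by omega)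
    rw [hA]
    exact (altScan_first A k m _ hpair ((hmemcs m).mpr hmem) hmf hmincs).symm
  · -- no feasible threshold in [0, 10^10]: A's search keeps ans = 0, B scans through
    push Not at hex
    have hA : solveLoop A k 0 (10 ^ 10) 0 = 0 :=
      (solveLoop_spec A k _ 0 (10 ^ 10) 0 hN).1 (fun x h1 h2 => hex x ⟨h1, h2⟩)
    rw [hA]
    refine (altScan_zero A k _ ?_).symm
    intro c hc hf
    have hc' := (hmemcs c).mp hc
    rw [mem_altCands] at hc'
    have hcb : (0 : Int) ≤ c ∧ c ≤ 10 ^ 10 := by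
      rcases hc' with rfl | ⟨i, j, h1, _, hceq, hcle⟩
      · exact ⟨le_refl 0, by norm_num⟩
      · exact ⟨hceq ▸ segCost_nonneg A h1, hcle⟩
    exact hex c hcb hf
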